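-- pv_equiv track=rewrite | github.com/youngju87/repos | working/comprehensive_cleanup.py | fix_tables
-- ===== SOURCE A (Python) =====
-- def fix_tables(text):
--     """Ensure all Markdown tables are properly formatted"""
--     lines = text.split('\n')
--     result = []
--     in_table = False
--
--     for i, line in enumerate(lines):
--         stripped = line.strip()
--
--         # Detect table rows
--         if '|' in stripped and stripped.count('|') >= 2:
--             if not in_table:
--                 # Start of table - add spacing
--                 if i > 0 and result and result[-1].strip():
--                     result.append('')
--                 in_table = True
--
--             # Clean up the table row
--             cells = [cell.strip() for cell in stripped.split('|')]
--             # Remove empty first/last cells if present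
--             if cells and not cells[0]:
--                 cells = cells[1:]
--             if cells and not cells[-1]:
--                 cells = cells[:-1]
--
--             result.append('| ' + ' | '.join(cells) + ' |')
--         else:
--             if in_table:
--                 # End of table - add spacing
--                 result.append('')
--                 in_table = False
--             result.append(line)
--
--     return '\n'.join(result)
-- ===== SOURCE B (Python) =====
-- def fix_tables(text):
--     """Ensure all Markdown tables are properly formatted"""
--     def is_row(line):
--         s = line.strip()
--         return '|' in s and s.count('|') >= 2
--
--     def fmt_row(line):
--         cells = [c.strip() for c in line.strip().split('|')]
--         if cells and not cells[0]:
--             cells = cells[1:]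
--         if cells and not cells[-1]:
--             cells = cells[:-1]
--         return '| ' + ' | '.join(cells) + ' |'
--
--     # group the lines into maximal consecutive runs with equal is_row value
--     lines = text.split('\n')
--     runs = []
--     j = 0
--     while j < len(lines):
--         k = is_row(lines[j])
--         start = j
--         j += 1
--         while j < len(lines) and is_row(lines[j]) == k:
--             j += 1
--         runs.append((k, lines[start:j]))
--
--     # emit the runs: table blocks are reformatted and padded with blank lines
--     out = []
--     while runs:
--         is_tab, grp = runs.pop(0)
--         if is_tab:
--             if out and out[-1].strip():
--                 out.append('')
--             out.extend(fmt_row(l) for l in grp)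
--             if runs:
--                 out.append('')
--         else:
--             out.extend(grp)
--     return '\n'.join(out)
-- ===== Notes on version B (the rewrite author's own statement) =====
-- stated objective: alternative
-- what changed: A's single stateful pass with an in_table flag is replaced by first grouping the lines into maximal consecutive runs by the table-row predicate and then emitting each run as a block (reformatted table blocks padded with blank lines, other runs passed through verbatim).
import Mathlib
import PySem

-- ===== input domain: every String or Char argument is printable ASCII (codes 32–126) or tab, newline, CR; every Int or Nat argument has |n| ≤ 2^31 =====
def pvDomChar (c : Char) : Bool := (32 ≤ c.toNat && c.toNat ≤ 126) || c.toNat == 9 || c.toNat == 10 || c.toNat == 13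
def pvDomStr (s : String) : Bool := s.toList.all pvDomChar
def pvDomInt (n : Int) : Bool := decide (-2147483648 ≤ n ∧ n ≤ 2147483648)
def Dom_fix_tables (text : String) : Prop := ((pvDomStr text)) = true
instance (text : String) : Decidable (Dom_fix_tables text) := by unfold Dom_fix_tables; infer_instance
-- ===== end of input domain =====

-- B re-decomposes A's stateful single pass into grouping the lines into maximal runs and
-- emitting each run as a block (objective: alternative decomposition, same cost).

-- ===== PORT A =====
-- shared helpers (B's Python has the same predicate / row formatter / truthiness test as named helpers;
-- in A they appear inline in the loop body)
-- "'|' in stripped and stripped.count('|') >= 2"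
def isRow (line : String) : Bool :=
  let stripped := PySem.Str.strip line
  PySem.Str.isIn "|" stripped && decide (2 ≤ PySem.Str.count stripped "|")

-- cells = [cell.strip() for cell in stripped.split('|')]; drop empty first/last cell; rejoin
def fmtRow (line : String) : String :=
  let cells := ((PySem.Chars.splitOn (PySem.Str.strip line).toList ['|']).map String.ofList).map PySem.Str.strip
  let cells := if cells.head? = some "" then cells.tail else cells
  let cells := if cells.getLast? = some "" then cells.dropLast else cells
  "| " ++ PySem.Str.join " | " cells ++ " |"

-- "result and result[-1].strip()" (truthiness of the last emitted line)
def lastTruthy (xs : List String) : Bool :=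
  match xs.getLast? with
  | some x => !(PySem.Str.strip x == "")
  | none => false

-- A's for-loop over enumerate(lines) with state (result, in_table)
def loopA : List String → Nat → List String → Bool → List String
  | [], _, result, _ => result
  | line :: rest, i, result, in_table =>
    if isRow line then
      let result := if in_table then result
        else if decide (0 < i) && lastTruthy result then result ++ [""] else result
      loopA rest (i + 1) (result ++ [fmtRow line]) true
    else
      let result := if in_table then result ++ [""] else result
      loopA rest (i + 1) (result ++ [line]) false

def fix_tables (text : String) : String :=
  PySem.Str.join "\n" (loopA ((PySem.Chars.splitOn text.toList ['\n']).map String.ofList) 0 [] false)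

-- ===== PORT B =====
-- group the lines into maximal consecutive runs with equal isRow value
def runsOf : List String → List (Bool × List String)
  | [] => []
  | l :: ls =>
    (isRow l, l :: ls.takeWhile (fun y => isRow y == isRow l)) ::
      runsOf (ls.dropWhile (fun y => isRow y == isRow l))
termination_by xs => xs.length
decreasing_by
  simp only [List.length_cons]
  exact Nat.lt_succ_of_le (List.length_dropWhile_le _ _)

-- emit the runs: table blocks are reformatted and padded with blank lines
def emitRuns : List (Bool × List String) → List String → List String
  | [], out => out
  | (isTab, grp) :: rest, out =>
    if isTab then
      let out := if lastTruthy out then out ++ [""] else out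
      let out := out ++ grp.map fmtRow
      let out := if rest ≠ [] then out ++ [""] else out
      emitRuns rest out
    else
      emitRuns rest (out ++ grp)

def fix_tables_alt (text : String) : String :=
  PySem.Str.join "\n" (emitRuns (runsOf ((PySem.Chars.splitOn text.toList ['\n']).map String.ofList)) [])

-- ===== PRECONDITION & SPEC =====
def Spec_fix_tables (text : String) (out : String) : Prop := out = fix_tables_alt text
instance (text : String) (out : String) : Decidable (Spec_fix_tables text out) := by unfold Spec_fix_tables; infer_instance

-- ===== CLAIM (what is proved, stated in full; the proofs are below) =====
def Claim_equal_fix_tables : Prop := ∀ (text : String), Dom_fix_tables text → Spec_fix_tables text (fix_tables text)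

-- ===== LEMMAS AND PROOFS =====
lemma lastTruthy_ne_nil {xs : List String} (h : lastTruthy xs = true) : xs ≠ [] := by
  intro hn; subst hn; simp [lastTruthy] at h

lemma head_dropWhile_false {α : Type} (p : α → Bool) :
    ∀ (l : List α) (x : α) (xs : List α), l.dropWhile p = x :: xs → p x = false := by
  intro l
  induction l with
  | nil => intro x xs h; simp [List.dropWhile] at h
  | cons a t ih =>
    intro x xs h
    by_cases hp : p a
    · rw [List.dropWhile_cons_of_pos hp] at h; exact ih x xs h
    · rw [List.dropWhile_cons_of_neg hp] at h
      cases h; simpa using hp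

lemma loopA_run (grp : List String) (h : ∀ x ∈ grp, isRow x = true) :
    ∀ (rest acc : List String) (i : Nat),
    loopA (grp ++ rest) i acc true = loopA rest (i + grp.length) (acc ++ grp.map fmtRow) true := by
  induction grp with
  | nil => intro rest acc i; simp
  | cons x t ih =>
    intro rest acc i
    have hx : isRow x = true := h x (List.mem_cons_self)
    simp only [List.cons_append, loopA, hx, if_pos]
    rw [ih (fun y hy => h y (List.mem_cons_of_mem _ hy)) rest (acc ++ [fmtRow x]) (i + 1)]
    simp only [List.map_cons, List.length_cons, List.append_assoc, List.singleton_append]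
    ring_nf

lemma loopA_nonrun (grp : List String) (h : ∀ x ∈ grp, isRow x = false) :
    ∀ (rest acc : List String) (i : Nat),
    loopA (grp ++ rest) i acc false = loopA rest (i + grp.length) (acc ++ grp) false := by
  induction grp with
  | nil => intro rest acc i; simp
  | cons x t ih =>
    intro rest acc i
    have hx : isRow x = false := h x (List.mem_cons_self)
    simp only [List.cons_append, loopA, hx, Bool.false_eq_true, if_false]
    rw [ih (fun y hy => h y (List.mem_cons_of_mem _ hy)) rest (acc ++ [x]) (i + 1)]
    simp only [List.length_cons, List.append_assoc, List.singleton_append]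
    ring_nf

lemma loopA_eq_emit : ∀ (n : Nat) (lines : List String), lines.length ≤ n →
    ∀ (acc : List String) (i : Nat), (acc ≠ [] → 0 < i) →
    loopA lines i acc false = emitRuns (runsOf lines) acc := by
  intro n
  induction n with
  | zero =>
    intro lines hlen acc i _
    have : lines = [] := List.eq_nil_of_length_eq_zero (Nat.le_zero.mp hlen)
    subst this; simp [loopA, runsOf, emitRuns]
  | succ n ih =>
    intro lines hlen acc i hinv
    cases lines with
    | nil => simp [loopA, runsOf, emitRuns]
    | cons l ls =>
      have hlen' : ls.length ≤ n := by simpa using hlen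
      rw [runsOf]
      cases hk : isRow l with
      | true =>
        have e1 : ls.takeWhile (fun y => isRow y == true) = ls.takeWhile isRow := by simp
        have e2 : ls.dropWhile (fun y => isRow y == true) = ls.dropWhile isRow := by simp
        rw [e1, e2]
        have hsplit : ls.takeWhile isRow ++ ls.dropWhile isRow = ls :=
          List.takeWhile_append_dropWhile
        have htw : ∀ x ∈ ls.takeWhile isRow, isRow x = true :=
          fun x hx => List.mem_takeWhile_imp hx
        have hcond : (decide (0 < i) && lastTruthy acc) = lastTruthy acc := by
          by_cases ht : lastTruthy acc = true
          · have := hinv (lastTruthy_ne_nil ht); simp [ht, this]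
          · simp [Bool.eq_false_iff.mpr ht]
        have hstep : loopA (l :: ls) i acc false
            = loopA (ls.dropWhile isRow) (i + 1 + (ls.takeWhile isRow).length)
              ((if lastTruthy acc then acc ++ [""] else acc)
                ++ fmtRow l :: (ls.takeWhile isRow).map fmtRow) true := by
          simp only [loopA, hk, if_true, hcond]
          conv_lhs => rw [← hsplit]
          rw [loopA_run (ls.takeWhile isRow) htw]
          simp [List.append_assoc]
        rw [hstep]
        cases hdw : ls.dropWhile isRow with
        | nil =>
          simp [loopA, runsOf, emitRuns]
        | cons r rs =>
          have hr : isRow r = false := head_dropWhile_false isRow ls r rs hdw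
          have hlen'' : (r :: rs).length ≤ n := by
            rw [← hdw]; exact le_trans (List.length_dropWhile_le _ _) hlen'
          have hA : loopA (r :: rs) (i + 1 + (ls.takeWhile isRow).length)
                ((if lastTruthy acc then acc ++ [""] else acc)
                  ++ fmtRow l :: (ls.takeWhile isRow).map fmtRow) true
              = loopA (r :: rs) (i + 1 + (ls.takeWhile isRow).length)
                ((if lastTruthy acc then acc ++ [""] else acc)
                  ++ fmtRow l :: (ls.takeWhile isRow).map fmtRow ++ [""]) false := by
            simp only [loopA, hr, Bool.false_eq_true, if_false, if_true, List.append_assoc]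
          rw [hA, ih (r :: rs) hlen'' _ _ (by intro _; omega)]
          have hne : runsOf (r :: rs) ≠ [] := by rw [runsOf]; exact List.cons_ne_nil _ _
          simp only [emitRuns, ne_eq, hne, not_false_iff, if_pos]
          simp [List.append_assoc]
      | false =>
        have e1 : ls.takeWhile (fun y => isRow y == false) = ls.takeWhile (fun y => !isRow y) := by simp
        have e2 : ls.dropWhile (fun y => isRow y == false) = ls.dropWhile (fun y => !isRow y) := by simp
        rw [e1, e2]
        have hsplit : ls.takeWhile (fun y => !isRow y) ++ ls.dropWhile (fun y => !isRow y) = ls :=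
          List.takeWhile_append_dropWhile
        have htw : ∀ x ∈ ls.takeWhile (fun y => !isRow y), isRow x = false := by
          intro x hx
          have := List.mem_takeWhile_imp hx
          simpa using this
        have hstep : loopA (l :: ls) i acc false
            = loopA (ls.dropWhile (fun y => !isRow y))
              (i + 1 + (ls.takeWhile (fun y => !isRow y)).length)
              (acc ++ l :: ls.takeWhile (fun y => !isRow y)) false := by
          simp only [loopA, hk, Bool.false_eq_true, if_false]
          conv_lhs => rw [← hsplit]
          rw [loopA_nonrun (ls.takeWhile (fun y => !isRow y)) htw]
          simp [List.append_assoc]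
        have hdlen : (ls.dropWhile (fun y => !isRow y)).length ≤ n :=
          le_trans (List.length_dropWhile_le _ _) hlen'
        rw [hstep, ih (ls.dropWhile (fun y => !isRow y)) hdlen _ _ (by intro _; omega)]
        simp [emitRuns]

-- ===== VERDICT (by name: the statement is the Claim_ definition above) =====
theorem fix_tables_spec : Claim_equal_fix_tables := by
  intro text _
  unfold Spec_fix_tables fix_tables fix_tables_alt
  rw [loopA_eq_emit ((PySem.Chars.splitOn text.toList ['\n']).map String.ofList).length _ le_rfl [] 0 (by simp)]
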